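-- pv_equiv track=rewrite | github.com/adnathanail/aoc | 2024/day03/part2.py | parse
-- ===== SOURCE A (Python) =====
-- def parse(toks):
--     tot = 0
--     enabled = True
--     for tok in toks:
--         if tok == "do()":
--             enabled = True
--         elif tok == "don't()":
--             enabled = False
--         elif enabled:
--             a, b = tok[4:-1].split(",")
--             tot += int(a) * int(b)
--     return tot
-- ===== SOURCE B (Python) =====
-- def _mul_value(tok):
--     a, b = tok[4:-1].split(",")
--     return int(a) * int(b)
--
--
-- def parse(toks):
--     # Pass 1: cut the token stream into segments at every toggle token,
--     # tagging each segment with the enabled flag set by the toggle opening it.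
--     segments = []
--     cur = []
--     flag = True
--     for tok in toks:
--         if tok == "do()":
--             segments.append((flag, cur))
--             cur, flag = [], True
--         elif tok == "don't()":
--             segments.append((flag, cur))
--             cur, flag = [], False
--         else:
--             cur.append(tok)
--     segments.append((flag, cur))
--     # Pass 2: sum the mul products over the tokens of enabled segments.
--     return sum(_mul_value(t) for flag, seg in segments if flag for t in seg)
-- ===== Notes on version B (the rewrite author's own statement) =====
-- stated objective: alternative
-- what changed: Replaces A's single stateful loop (running total + enabled flag) by a two-phase decomposition: first cut the token stream into toggle-delimited segments tagged with their enabled flag, then sum the mul products over the tokens of enabled segments only.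
import Mathlib
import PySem

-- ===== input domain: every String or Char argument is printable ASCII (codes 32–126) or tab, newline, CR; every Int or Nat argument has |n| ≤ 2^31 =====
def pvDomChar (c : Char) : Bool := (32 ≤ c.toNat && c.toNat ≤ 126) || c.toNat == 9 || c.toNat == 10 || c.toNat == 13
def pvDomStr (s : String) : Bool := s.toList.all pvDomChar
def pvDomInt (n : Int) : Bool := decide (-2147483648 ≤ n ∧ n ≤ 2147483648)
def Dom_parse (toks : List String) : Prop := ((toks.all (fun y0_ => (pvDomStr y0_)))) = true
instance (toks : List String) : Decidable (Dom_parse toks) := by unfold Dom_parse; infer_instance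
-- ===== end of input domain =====

-- B replaces A's single stateful loop by a segment decomposition (cut at toggles, then sum
-- over enabled segments); equivalence is about the return value (neither mutates its argument).

-- ===== PORT A =====
-- `a, b = tok[4:-1].split(","); int(a) * int(b)` — both sources compute this identically;
-- under Pre_ the split yields exactly two int-parseable parts, so the defaults are never used.
def mulVal (tok : String) : Int :=
  match PySem.Str.split? (PySem.Str.slice tok (some 4) (some (-1))) "," with
  | some [a, b] => (PySem.Int.ofStr? a).getD 0 * (PySem.Int.ofStr? b).getD 0
  | _ => 0

def parseStep (st : Int × Bool) (tok : String) : Int × Bool :=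
  if tok == "do()" then (st.1, true)
  else if tok == "don't()" then (st.1, false)
  else if st.2 then (st.1 + mulVal tok, st.2)
  else st

def parse (toks : List String) : Int :=
  (toks.foldl parseStep (0, true)).1

-- ===== PORT B =====
def altStep (st : List (Bool × List String) × Bool × List String) (tok : String) :
    List (Bool × List String) × Bool × List String :=
  if tok == "do()" then (st.1 ++ [(st.2.1, st.2.2)], true, [])
  else if tok == "don't()" then (st.1 ++ [(st.2.1, st.2.2)], false, [])
  else (st.1, st.2.1, st.2.2 ++ [tok])

def segSum (p : Bool × List String) : Int :=
  if p.1 then (p.2.map mulVal).sum else 0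

def parse_alt (toks : List String) : Int :=
  let st := toks.foldl altStep ([], true, [])
  ((st.1 ++ [(st.2.1, st.2.2)]).map segSum).sum

-- ===== PRECONDITION & SPEC =====
-- helpers for Pre_ only (independent of the ports)
def wfTok (t : String) : Bool :=
  match PySem.Str.split? (PySem.Str.slice t (some 4) (some (-1))) "," with
  | some [a, b] => (PySem.Int.ofStr? a).isSome && (PySem.Int.ofStr? b).isSome
  | _ => false

def enabledPrefix (pre : List String) : Bool :=
  match (pre.filter (fun t => t == "do()" || t == "don't()")).getLast? with
  | some t => t == "do()"
  | none => true

-- Pre_ excludes exactly the inputs where the Python raises (ValueError): a non-toggle token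
-- in an enabled position (last toggle before it absent or "do()") whose tok[4:-1] does not
-- split on "," into exactly two int()-parseable parts.
def Pre_parse (toks : List String) : Prop :=
  ∀ i, (h : i < toks.length) → toks[i] ≠ "do()" → toks[i] ≠ "don't()" →
    enabledPrefix (toks.take i) = true → wfTok toks[i] = true

instance (toks : List String) : Decidable (Pre_parse toks) := by
  unfold Pre_parse; infer_instance

def pvWitness_parse : List String :=
  ["mul(2,3)", "don't()", "mul(4,5)", "do()", "mul(6,7)"]

def Spec_parse (toks : List String) (out : Int) : Prop := out = parse_alt toks
instance (toks : List String) (out : Int) : Decidable (Spec_parse toks out) := by unfold Spec_parse; infer_instance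

-- ===== CLAIM (what is proved, stated in full; the proofs are below) =====
def Claim_equal_parse : Prop := ∀ (toks : List String), Dom_parse toks → Pre_parse toks → Spec_parse toks (parse toks)

-- ===== LEMMAS AND PROOFS =====
lemma segSum_append (f : Bool) (c : List String) (t : String) :
    segSum (f, c ++ [t]) = segSum (f, c) + (if f then mulVal t else 0) := by
  cases f <;> simp [segSum]

lemma parseStep_do (st : Int × Bool) : parseStep st "do()" = (st.1, true) := by
  simp [parseStep]

lemma parseStep_dont (st : Int × Bool) : parseStep st "don't()" = (st.1, false) := by
  simp [parseStep]

lemma parseStep_other (st : Int × Bool) (t : String) (h1 : t ≠ "do()") (h2 : t ≠ "don't()") :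
    parseStep st t = if st.2 then (st.1 + mulVal t, st.2) else st := by
  simp [parseStep, h1, h2]

lemma altStep_do (st : List (Bool × List String) × Bool × List String) :
    altStep st "do()" = (st.1 ++ [(st.2.1, st.2.2)], true, []) := by
  simp [altStep]

lemma altStep_dont (st : List (Bool × List String) × Bool × List String) :
    altStep st "don't()" = (st.1 ++ [(st.2.1, st.2.2)], false, []) := by
  simp [altStep]

lemma altStep_other (st : List (Bool × List String) × Bool × List String) (t : String)
    (h1 : t ≠ "do()") (h2 : t ≠ "don't()") :
    altStep st t = (st.1, st.2.1, st.2.2 ++ [t]) := by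
  simp [altStep, h1, h2]

lemma key (toks : List String) :
    ∀ (segs : List (Bool × List String)) (flag : Bool) (cur : List String) (tot : Int),
    (toks.foldl parseStep (tot, flag)).1
      + (segs.map segSum).sum + segSum (flag, cur)
    = tot + (((toks.foldl altStep (segs, flag, cur)).1
        ++ [((toks.foldl altStep (segs, flag, cur)).2.1,
             (toks.foldl altStep (segs, flag, cur)).2.2)]).map segSum).sum := by
  induction toks with
  | nil =>
    intro segs flag cur tot
    simp; ring
  | cons t rest ih =>
    intro segs flag cur tot
    by_cases h1 : t = "do()"
    · subst h1
      simp only [List.foldl_cons, parseStep_do, altStep_do]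
      have := ih (segs ++ [(flag, cur)]) true [] tot
      simp [segSum] at this ⊢
      omega
    · by_cases h2 : t = "don't()"
      · subst h2
        simp only [List.foldl_cons, parseStep_dont, altStep_dont]
        have := ih (segs ++ [(flag, cur)]) false [] tot
        simp [segSum] at this ⊢
        omega
      · simp only [List.foldl_cons, parseStep_other _ _ h1 h2, altStep_other _ _ h1 h2]
        cases flag with
        | true =>
          have := ih segs true (cur ++ [t]) (tot + mulVal t)
          rw [segSum_append] at this
          simp [segSum] at this ⊢
          omega
        | false =>
          have := ih segs false (cur ++ [t]) tot
          rw [segSum_append] at this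
          simp [segSum] at this ⊢
          omega

-- ===== VERDICT (by name: the statement is the Claim_ definition above) =====
theorem parse_spec : Claim_equal_parse := by
  intro toks _ _
  unfold Spec_parse parse parse_alt
  have := key toks [] true [] 0
  simp [segSum] at this ⊢
  omega
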